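-- pv_equiv track=rewrite | github.com/androlga-bot/labarator2 | lab2.py | check_Occrnc_Word
-- ===== SOURCE A (Python) =====
-- def check_Occrnc_Word(list_Check,list_Confid):
--     count=0
--     if  list_Check!=['']:
--             for i in range(len(list_Check)):
--                 if not (list_Check[i] in list_Confid.split(';')):
--                     count+=1
--             if count==len(list_Check):
--                 return True
-- ===== SOURCE B (Python) =====
-- def check_Occrnc_Word(list_Check, list_Confid):
--     if list_Check != ['']:
--         check_set = set(list_Check)
--         for word in list_Confid.split(';'):
--             if word in check_set:
--                 return
--         return True
-- ===== Notes on version B (the rewrite author's own statement) =====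
-- stated objective: faster
-- what changed: Reverses the traversal: instead of counting, over an index loop, the check-words absent from a freshly re-split confid list and comparing the count with the length, B splits the confid string once, builds a set of check-words, and returns early on the first confid word found in it.
import Mathlib
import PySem

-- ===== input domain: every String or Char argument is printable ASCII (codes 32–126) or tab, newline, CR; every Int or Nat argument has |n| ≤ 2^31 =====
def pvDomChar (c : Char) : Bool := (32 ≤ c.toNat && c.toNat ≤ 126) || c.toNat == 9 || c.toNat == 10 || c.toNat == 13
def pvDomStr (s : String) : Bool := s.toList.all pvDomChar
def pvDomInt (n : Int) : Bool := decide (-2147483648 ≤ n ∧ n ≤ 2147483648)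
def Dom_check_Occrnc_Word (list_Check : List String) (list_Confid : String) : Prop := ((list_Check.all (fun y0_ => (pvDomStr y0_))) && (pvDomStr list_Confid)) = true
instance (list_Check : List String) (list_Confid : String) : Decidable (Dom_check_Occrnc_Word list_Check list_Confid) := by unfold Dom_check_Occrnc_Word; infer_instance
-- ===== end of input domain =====

-- B reverses the traversal: split once, build a set of check-words, return on the first confid word found in it (simpler; return-value equivalence).
-- ===== PORT A =====
def check_Occrnc_Word (list_Check : List String) (list_Confid : String) : Option Bool :=
  -- count=0; for i in range(len): if not (list_Check[i] in list_Confid.split(';')): count+=1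
  if list_Check ≠ [""] then
    let count : Int := list_Check.foldl
      (fun c w => if ¬ (w ∈ ((PySem.Str.split? list_Confid ";").getD [])) then c + 1 else c) 0
    if count = (list_Check.length : Int) then some true else none
  else none

-- ===== PORT B =====
def altLoop (checkSet : PySem.Set String) : List String → Option Bool
  | [] => some true
  | w :: ws => if PySem.Set.contains checkSet w then none else altLoop checkSet ws

def check_Occrnc_Word_alt (list_Check : List String) (list_Confid : String) : Option Bool :=
  if list_Check ≠ [""] then
    altLoop (PySem.Set.ofList list_Check) (((PySem.Str.split? list_Confid ";").getD []))
  else none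

-- ===== PRECONDITION & SPEC =====
def Spec_check_Occrnc_Word (list_Check : List String) (list_Confid : String) (out : Option Bool) : Prop := out = check_Occrnc_Word_alt list_Check list_Confid
instance (list_Check : List String) (list_Confid : String) (out : Option Bool) : Decidable (Spec_check_Occrnc_Word list_Check list_Confid out) := by unfold Spec_check_Occrnc_Word; infer_instance

-- ===== CLAIM (what is proved, stated in full; the proofs are below) =====
def Claim_equal_check_Occrnc_Word : Prop := ∀ (list_Check : List String) (list_Confid : String), Dom_check_Occrnc_Word list_Check list_Confid → Spec_check_Occrnc_Word list_Check list_Confid (check_Occrnc_Word list_Check list_Confid)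

-- ===== LEMMAS AND PROOFS =====
theorem countFold (sp : List String) (lc : List String) (c : Int) :
    lc.foldl (fun c w => if ¬ (w ∈ sp) then c + 1 else c) c
      = c + (lc.countP (fun w => decide (w ∉ sp)) : Int) := by
  induction lc generalizing c with
  | nil => simp
  | cons w ws ih =>
    simp only [List.foldl_cons, List.countP_cons, ih]
    by_cases h : w ∈ sp
    · simp [h]
    · simp [h]; ring

theorem altLoop_eq (S : PySem.Set String) (ws : List String) :
    altLoop S ws = if ∀ w ∈ ws, w ∉ S then some true else none := by
  induction ws with
  | nil => simp [altLoop]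
  | cons w ws ih =>
    by_cases h : w ∈ S
    · simp [altLoop, h]
    · simp [altLoop, h, ih]

-- ===== VERDICT (by name: the statement is the Claim_ definition above) =====
theorem check_Occrnc_Word_spec : Claim_equal_check_Occrnc_Word := by
  intro lc conf _
  unfold Spec_check_Occrnc_Word check_Occrnc_Word check_Occrnc_Word_alt
  by_cases hne : lc ≠ [""]
  · simp only [ne_eq, hne, not_false_iff, if_true, countFold, altLoop_eq, zero_add,
      Int.natCast_inj, List.countP_eq_length, decide_eq_true_eq, PySem.Set.mem_ofList]
    have hsym : (∀ a ∈ lc, a ∉ (PySem.Str.split? conf ";").getD [])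
        ↔ (∀ w ∈ (PySem.Str.split? conf ";").getD [], w ∉ lc) :=
      ⟨fun h w hw hl => h w hl hw, fun h a hl ha => h a ha hl⟩
    simp only [hsym]
  · simp [hne]
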